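-- pv_equiv track=rewrite | github.com/Techatech/Infrastruct | tools/ascii_diagramming_tool.py | arrange_in_layers
-- ===== SOURCE A (Python) =====
-- from typing import Dict, List, Tuple
--
-- def arrange_in_layers(components: List[Dict]) -> List[List[Dict]]:
--     """Arrange components in logical layers"""
--     layers = []
--
--     # Define layer priorities
--     layer_priority = {
--         'users': 0, 'internet': 0,
--         'route53': 1, 'cloudfront': 1,
--         'loadbalancer': 2, 'apigateway': 2,
--         'ec2': 3, 'lambda': 3,
--         'rds': 4, 'dynamodb': 4, 's3': 4
--     }
--
--     # Group by layers
--     layer_groups = {}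
--     for comp in components:
--         layer = layer_priority.get(comp['name'], 5)
--         if layer not in layer_groups:
--             layer_groups[layer] = []
--         layer_groups[layer].append(comp)
--
--     # Convert to ordered list
--     for layer_num in sorted(layer_groups.keys()):
--         layers.append(layer_groups[layer_num])
--
--     return layers
-- ===== SOURCE B (Python) =====
-- def arrange_in_layers(components):
--     """Arrange components in logical layers"""
--     layer_priority = {
--         'users': 0, 'internet': 0,
--         'route53': 1, 'cloudfront': 1,
--         'loadbalancer': 2, 'apigateway': 2,
--         'ec2': 3, 'lambda': 3,
--         'rds': 4, 'dynamodb': 4, 's3': 4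
--     }
--     layers = []
--     for layer in range(6):
--         group = [c for c in components if layer_priority.get(c['name'], 5) == layer]
--         if group:
--             layers.append(group)
--     return layers
-- ===== Notes on version B (the rewrite author's own statement) =====
-- stated objective: simpler
-- what changed: Replaces the grouping dict plus key-sort with a direct loop over the six fixed layer indices 0..5, filtering the component list for each and appending non-empty groups.
import Mathlib
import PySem

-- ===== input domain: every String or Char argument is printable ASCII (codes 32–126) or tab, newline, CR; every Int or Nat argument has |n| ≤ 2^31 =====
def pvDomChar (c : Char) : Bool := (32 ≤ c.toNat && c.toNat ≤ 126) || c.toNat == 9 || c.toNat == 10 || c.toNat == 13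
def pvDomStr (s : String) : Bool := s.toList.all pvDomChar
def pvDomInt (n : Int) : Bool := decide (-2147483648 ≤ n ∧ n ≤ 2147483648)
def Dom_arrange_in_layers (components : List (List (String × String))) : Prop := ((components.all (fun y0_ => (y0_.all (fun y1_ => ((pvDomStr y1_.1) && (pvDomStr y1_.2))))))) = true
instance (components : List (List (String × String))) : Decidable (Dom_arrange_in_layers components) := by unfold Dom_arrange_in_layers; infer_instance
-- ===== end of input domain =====

-- B replaces A's grouping dict + sorted-keys pass with a direct scan over the six fixed
-- layer indices 0..5, filtering the component list per index (objective: simpler).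

-- ===== PORT A =====
-- the literal layer_priority dict both Pythons define
def pvPriority : PySem.Dict String Int :=
  PySem.Dict.ofList [("users", 0), ("internet", 0),
    ("route53", 1), ("cloudfront", 1),
    ("loadbalancer", 2), ("apigateway", 2),
    ("ec2", 3), ("lambda", 3),
    ("rds", 4), ("dynamodb", 4), ("s3", 4)]

-- layer_priority.get(comp['name'], 5); the .getD "" default is only reached outside Pre_
def pvLayerOf (comp : List (String × String)) : Int :=
  PySem.Dict.getD pvPriority ((comp.lookup "name").getD "") 5

def arrange_in_layers (components : List (List (String × String))) : List (List (List (String × String))) :=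
  -- group by layers: if layer not in layer_groups: []=; layer_groups[layer].append(comp)
  let layer_groups : PySem.Dict Int (List (List (String × String))) :=
    components.foldl (fun d comp => d.modify (pvLayerOf comp) [] (· ++ [comp])) PySem.Dict.empty
  -- for layer_num in sorted(layer_groups.keys()): layers.append(layer_groups[layer_num])
  (PySem.List.sorted layer_groups.keys (fun x => x) false).foldl
    (fun layers k => layers ++ [layer_groups.getD k []]) []

-- ===== PORT B =====
def arrange_in_layers_alt (components : List (List (String × String))) : List (List (List (String × String))) :=
  (PySem.List.pyRange 0 6 1).foldl
    (fun layers layer =>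
      let group := components.filter (fun c => pvLayerOf c == layer)
      if group = [] then layers else layers ++ [group]) []

-- ===== PRECONDITION & SPEC =====
-- Pre_ excludes components lacking a 'name' key, on which Python A raises KeyError (B raises too).
def Pre_arrange_in_layers (components : List (List (String × String))) : Prop :=
  ∀ comp ∈ components, (comp.lookup "name").isSome = true
instance (components : List (List (String × String))) : Decidable (Pre_arrange_in_layers components) := by unfold Pre_arrange_in_layers; infer_instance
def pvWitness_arrange_in_layers : (List (List (String × String))) := [[("name", "ec2"), ("x", "a")], [("name", "zzz")]]

def Spec_arrange_in_layers (components : List (List (String × String))) (out : List (List (List (String × String)))) : Prop := out = arrange_in_layers_alt components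
instance (components : List (List (String × String))) (out : List (List (List (String × String)))) : Decidable (Spec_arrange_in_layers components out) := by unfold Spec_arrange_in_layers; infer_instance

-- ===== CLAIM (what is proved, stated in full; the proofs are below) =====
def Claim_equal_arrange_in_layers : Prop := ∀ (components : List (List (String × String))), Dom_arrange_in_layers components → Pre_arrange_in_layers components → Spec_arrange_in_layers components (arrange_in_layers components)

-- ===== LEMMAS AND PROOFS =====

-- every priority value in the literal dict lies in 0..5
theorem pvPriority_items_range : ∀ p ∈ pvPriority.items, p.2 ∈ ([0, 1, 2, 3, 4, 5] : List Int) := by decide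

theorem pvLayerOf_mem (c : List (String × String)) :
    pvLayerOf c ∈ ([0, 1, 2, 3, 4, 5] : List Int) := by
  unfold pvLayerOf
  rcases h : PySem.Dict.get? pvPriority ((c.lookup "name").getD "") with _ | v
  · rw [PySem.Dict.getD_eq_get?_getD, h]; decide
  · rw [PySem.Dict.getD_eq_get?_getD, h]
    exact pvPriority_items_range _ (PySem.Dict.mem_items_of_get?_eq_some _ h)

-- the grouping dict's entry at k is the stable filter of components at layer k
theorem groupD_getD (l : List (List (String × String))) (k : Int) :
    (l.foldl (fun d comp => d.modify (pvLayerOf comp) [] (· ++ [comp])) PySem.Dict.empty).getD k []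
      = l.filter (fun c => pvLayerOf c == k) := by
  have h : (l.map (fun c => (pvLayerOf c, c))).foldl (fun d p => d.modify p.1 [] (· ++ [p.2])) PySem.Dict.empty
      = l.foldl (fun d comp => d.modify (pvLayerOf comp) [] (· ++ [comp])) PySem.Dict.empty := by
    rw [List.foldl_map]
  rw [← h, PySem.Dict.getD_foldl_modify_append]
  simp [List.filter_map, Function.comp_def]

theorem groupD_keys (l : List (List (String × String))) :
    (l.foldl (fun d comp => d.modify (pvLayerOf comp) [] (· ++ [comp])) PySem.Dict.empty).keys
      = PySem.Set.ofList (l.map pvLayerOf) := by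
  rw [PySem.Dict.keys_foldl_modify_key]
  simp [PySem.Set.ofList_eq_foldl, PySem.Set.update]

theorem sorted_keys_eq (m : List Int) (hm : ∀ x ∈ m, x ∈ ([0, 1, 2, 3, 4, 5] : List Int)) :
    PySem.List.sorted (PySem.Set.ofList m) (fun x => x) false
      = ([0, 1, 2, 3, 4, 5] : List Int).filter (fun k => decide (k ∈ m)) := by
  apply PySem.List.sorted_eq_of_perm_of_pairwise_lt
  · rw [List.perm_ext_iff_of_nodup (List.Nodup.filter _ (by decide)) (PySem.Set.nodup_ofList m)]
    intro a
    simp only [List.mem_filter, PySem.Set.mem_ofList, decide_eq_true_eq]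
    exact ⟨fun h => h.2, fun h => ⟨hm a h, h⟩⟩
  · have hp : (([0, 1, 2, 3, 4, 5] : List Int)).Pairwise (· < ·) := by decide
    exact List.Pairwise.sublist (List.filter_sublist (l := ([0, 1, 2, 3, 4, 5] : List Int))) hp

theorem foldl_app {α β : Type} (g : α → β) (ks : List α) (acc : List β) :
    ks.foldl (fun a k => a ++ [g k]) acc = acc ++ ks.map g := by
  induction ks generalizing acc with
  | nil => simp
  | cons k ks ih => simp [ih]

theorem foldl_if_app {α β : Type} [DecidableEq β] (g : α → List β) (ks : List α) (acc : List (List β)) :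
    ks.foldl (fun a k => if g k = [] then a else a ++ [g k]) acc
      = acc ++ (ks.filter (fun k => decide (g k ≠ []))).map g := by
  induction ks generalizing acc with
  | nil => simp
  | cons k ks ih =>
    by_cases h : g k = [] <;> simp [h, ih]

-- ===== VERDICT (by name: the statement is the Claim_ definition above) =====
theorem arrange_in_layers_spec : Claim_equal_arrange_in_layers := by
  intro components _ _
  unfold Spec_arrange_in_layers arrange_in_layers arrange_in_layers_alt
  simp only [groupD_keys, groupD_getD]
  rw [sorted_keys_eq (components.map pvLayerOf) (by intro x hx; rcases List.mem_map.1 hx with ⟨c, _, rfl⟩; exact pvLayerOf_mem c)]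
  have hrange : PySem.List.pyRange 0 6 1 = ([0, 1, 2, 3, 4, 5] : List Int) := by decide
  rw [hrange, foldl_app, foldl_if_app]
  simp only [List.nil_append]
  congr 1
  apply List.filter_congr
  intro k _
  simp [List.mem_map, List.filter_eq_nil_iff]
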